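-- pv_equiv track=rewrite | github.com/daniel-bicu/KnowledgeGraphs-DistributedComputing | app/src/jobs/embeddings_computing.py | extract_topics_v3
-- ===== SOURCE A (Python) =====
-- def extract_topics_v3(d, key, depth=1, max_depth=3, seen=None):
--     if seen is None:
--         seen = set()
--
--     topics = []
--     key_topics = d.get(key, [])
--
--     for subkey in key_topics:
--         if subkey not in seen:
--             seen.add(subkey)
--             topics.append(subkey)
--             if depth < max_depth:
--                 topics.extend(extract_topics_v3(d, subkey, depth + 1, max_depth, seen))
--
--     return topics
-- ===== SOURCE B (Python) =====
-- def extract_topics_v3(d, key, depth=1, max_depth=3, seen=None):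
--     # Iterative stack-based DFS instead of recursion; same return value.
--     # Like A, mutates the caller-supplied `seen` set by adding visited nodes.
--     if seen is None:
--         seen = set()
--     topics = []
--     stack = [(c, depth) for c in reversed(d.get(key, []))]
--     while stack:
--         node, dep = stack.pop()
--         if node not in seen:
--             seen.add(node)
--             topics.append(node)
--             if dep < max_depth:
--                 for c in reversed(d.get(node, [])):
--                     stack.append((c, dep + 1))
--     return topics
-- ===== Notes on version B (the rewrite author's own statement) =====
-- stated objective: alternative
-- what changed: Replaced the recursive depth-bounded DFS with an iterative explicit-stack DFS that carries (node, depth) pairs, pushing children in reversed order to preserve preorder.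
import Mathlib
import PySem

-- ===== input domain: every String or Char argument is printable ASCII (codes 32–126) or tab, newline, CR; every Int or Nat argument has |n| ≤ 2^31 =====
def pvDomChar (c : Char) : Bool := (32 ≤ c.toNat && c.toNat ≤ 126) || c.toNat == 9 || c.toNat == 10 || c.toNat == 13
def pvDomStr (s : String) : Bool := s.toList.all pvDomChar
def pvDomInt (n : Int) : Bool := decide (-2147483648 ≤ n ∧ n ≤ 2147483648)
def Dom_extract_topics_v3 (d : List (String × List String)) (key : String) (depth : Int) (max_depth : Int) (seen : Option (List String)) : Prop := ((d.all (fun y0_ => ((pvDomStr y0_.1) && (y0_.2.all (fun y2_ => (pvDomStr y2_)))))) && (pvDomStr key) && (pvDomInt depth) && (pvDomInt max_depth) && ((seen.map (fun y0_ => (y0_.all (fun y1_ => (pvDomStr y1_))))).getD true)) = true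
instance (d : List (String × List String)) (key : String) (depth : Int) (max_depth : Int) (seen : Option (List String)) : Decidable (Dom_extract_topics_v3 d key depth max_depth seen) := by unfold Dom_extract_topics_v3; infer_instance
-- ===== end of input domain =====

-- ===== PORT A =====
-- B replaces A's recursive depth-bounded DFS by an explicit-stack iterative DFS (same return
-- value; like A, the Python B mutates a caller-supplied `seen` set — equivalence here is about
-- the return value, and both Pythons perform the same mutation).

-- d.get(k, []) on the association list (first match), shared by both ports
def pvGet (d : List (String × List String)) (k : String) : List String :=
  match d with
  | [] => []
  | (a, b) :: rest => if a == k then b else pvGet rest k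

-- A's recursive body: processes the list of subkeys of the current key, threading `seen`
-- (Python mutates one shared set); returns (topics, final seen).
def goA (d : List (String × List String)) (subkeys : List String) (depth max_depth : Int)
    (seen : List String) : List String × List String :=
  match subkeys with
  | [] => ([], seen)
  | sk :: rest =>
    if seen.contains sk then goA d rest depth max_depth seen
    else
      let seen1 := seen ++ [sk]
      if h : depth < max_depth then
        let p := goA d (pvGet d sk) (depth + 1) max_depth seen1
        let q := goA d rest depth max_depth p.2
        (sk :: (p.1 ++ q.1), q.2)
      else
        let q := goA d rest depth max_depth seen1
        (sk :: q.1, q.2)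
termination_by ((max_depth - depth).toNat, subkeys.length)
decreasing_by
  · apply Prod.Lex.right; simp
  · apply Prod.Lex.left; omega
  · apply Prod.Lex.right; simp
  · apply Prod.Lex.right; simp

def extract_topics_v3 (d : List (String × List String)) (key : String) (depth : Int) (max_depth : Int) (seen : Option (List String)) : List String :=
  let seen0 := seen.getD []   -- `if seen is None: seen = set()`
  (goA d (pvGet d key) depth max_depth seen0).1

-- ===== PORT B =====
-- termination measure for the stack loop: a per-entry weight bounding the subtree it can unfold
def pvMaxLen (d : List (String × List String)) : Nat :=
  d.foldr (fun p m => max p.2.length m) 0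

def pvG (K : Nat) : Nat → Nat
  | 0 => 1
  | m + 1 => 1 + K * pvG K m

def pvMeasure (d : List (String × List String)) (max_depth : Int)
    (stack : List (String × Int)) : Nat :=
  (stack.map (fun p => pvG (pvMaxLen d) ((max_depth - p.2).toNat))).sum

theorem pvG_pos (K m : Nat) : 1 ≤ pvG K m := by
  cases m <;> simp [pvG]

theorem pvGet_len_le (d : List (String × List String)) (k : String) :
    (pvGet d k).length ≤ pvMaxLen d := by
  induction d with
  | nil => simp [pvGet, pvMaxLen]
  | cons p rest ih =>
    obtain ⟨a, b⟩ := p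
    simp only [pvGet, pvMaxLen, List.foldr] at *
    split
    · exact Nat.le_max_left _ _
    · exact le_trans ih (Nat.le_max_right _ _)

theorem pvMeasure_pop (d : List (String × List String)) (md : Int) (node : String)
    (dep : Int) (rest : List (String × Int)) :
    pvMeasure d md rest < pvMeasure d md ((node, dep) :: rest) := by
  simp only [pvMeasure, List.map_cons, List.sum_cons]
  have := pvG_pos (pvMaxLen d) ((md - dep).toNat)
  omega

theorem pvMeasure_push (d : List (String × List String)) (md : Int) (node : String)
    (dep : Int) (rest : List (String × Int)) (h : dep < md) :
    pvMeasure d md ((pvGet d node).map (fun c => (c, dep + 1)) ++ rest)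
      < pvMeasure d md ((node, dep) :: rest) := by
  simp only [pvMeasure, List.map_cons, List.sum_cons, List.map_append, List.sum_append,
    List.map_map]
  have hlen := pvGet_len_le d node
  have hm : (md - dep).toNat = (md - (dep + 1)).toNat + 1 := by omega
  rw [hm]
  have hconst : ((pvGet d node).map
      ((fun p : String × Int => pvG (pvMaxLen d) ((md - p.2).toNat)) ∘ fun c => (c, dep + 1))).sum
      = (pvGet d node).length * pvG (pvMaxLen d) ((md - (dep + 1)).toNat) := by
    induction pvGet d node with
    | nil => simp
    | cons x xs ih => simp [ih, Nat.succ_mul]; ring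
  rw [hconst, pvG]
  have : (pvGet d node).length * pvG (pvMaxLen d) ((md - (dep + 1)).toNat)
      ≤ pvMaxLen d * pvG (pvMaxLen d) ((md - (dep + 1)).toNat) :=
    Nat.mul_le_mul_right _ hlen
  omega

-- B's loop: explicit stack of (node, depth) pairs, top of stack at the head
-- (Source B keeps the top at the end and pops from the end; children pushed in reversed
-- order there appear here in original order at the front — same pop order).
def goB (d : List (String × List String)) (stack : List (String × Int)) (max_depth : Int)
    (seen : List String) (topics : List String) : List String :=
  match stack with
  | [] => topics
  | (node, dep) :: rest =>
    if seen.contains node then goB d rest max_depth seen topics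
    else if h : dep < max_depth then
      goB d ((pvGet d node).map (fun c => (c, dep + 1)) ++ rest) max_depth
        (seen ++ [node]) (topics ++ [node])
    else goB d rest max_depth (seen ++ [node]) (topics ++ [node])
termination_by pvMeasure d max_depth stack
decreasing_by
  · exact pvMeasure_pop d max_depth node dep rest
  · exact pvMeasure_push d max_depth node dep rest h
  · exact pvMeasure_pop d max_depth node dep rest

def extract_topics_v3_alt (d : List (String × List String)) (key : String) (depth : Int) (max_depth : Int) (seen : Option (List String)) : List String :=
  let seen0 := seen.getD []   -- `if seen is None: seen = set()`
  goB d ((pvGet d key).map (fun c => (c, depth))) max_depth seen0 []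
-- ===== PRECONDITION & SPEC =====
def Spec_extract_topics_v3 (d : List (String × List String)) (key : String) (depth : Int) (max_depth : Int) (seen : Option (List String)) (out : List String) : Prop := out = extract_topics_v3_alt d key depth max_depth seen
instance (d : List (String × List String)) (key : String) (depth : Int) (max_depth : Int) (seen : Option (List String)) (out : List String) : Decidable (Spec_extract_topics_v3 d key depth max_depth seen out) := by unfold Spec_extract_topics_v3; infer_instance

-- ===== CLAIM (what is proved, stated in full; the proofs are below) =====
def Claim_equal_extract_topics_v3 : Prop := ∀ (d : List (String × List String)) (key : String) (depth : Int) (max_depth : Int) (seen : Option (List String)), Dom_extract_topics_v3 d key depth max_depth seen → Spec_extract_topics_v3 d key depth max_depth seen (extract_topics_v3 d key depth max_depth seen)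

-- ===== LEMMAS AND PROOFS =====
theorem goB_goA (d : List (String × List String)) (subkeys : List String)
    (depth max_depth : Int) (seen : List String) :
    ∀ (rest : List (String × Int)) (acc : List String),
      goB d (subkeys.map (fun c => (c, depth)) ++ rest) max_depth seen acc
        = goB d rest max_depth (goA d subkeys depth max_depth seen).2
            (acc ++ (goA d subkeys depth max_depth seen).1) := by
  fun_induction goA d subkeys depth max_depth seen with
  | case1 => intro rest acc; simp
  | case2 x1 x2 x3 x4 x5 x6 =>
    intro rest acc
    simp only [goB, List.map_cons, List.cons_append, x5, if_true]
    exact x6 rest acc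
  | case3 x1 x2 x3 x4 x5 x6 x7 x8 x9 x10 x11 x12 =>
    intro rest acc
    simp only [goB, List.map_cons, List.cons_append, x5, Bool.false_eq_true, if_false]
    rw [dif_pos x7]
    rw [x11 (List.map (fun c => (c, x1)) x4 ++ rest) (acc ++ [x3])]
    rw [show goA d (pvGet d x3) (x1 + 1) max_depth (x2 ++ [x3]) = x8 from rfl]
    rw [x12 rest ((acc ++ [x3]) ++ x8.1)]
    rw [show goA d x4 x1 max_depth x8.2 = x9 from rfl]
    simp
  | case4 x1 x2 x3 x4 x5 x6 x7 x8 x9 =>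
    intro rest acc
    simp only [goB, List.map_cons, List.cons_append, x5, Bool.false_eq_true, if_false]
    rw [dif_neg x7]
    rw [x9 rest (acc ++ [x3])]
    rw [show goA d x4 x1 max_depth (x2 ++ [x3]) = x8 from rfl]
    simp

-- ===== VERDICT (by name: the statement is the Claim_ definition above) =====
theorem extract_topics_v3_spec : Claim_equal_extract_topics_v3 := by
  intro d key depth max_depth seen _
  unfold Spec_extract_topics_v3 extract_topics_v3 extract_topics_v3_alt
  have h := goB_goA d (pvGet d key) depth max_depth (seen.getD []) [] []
  simpa [goB] using h.symm
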